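-- pv_equiv track=rewrite | github.com/takingstock/CodeSapper | code_db/python/vendor_list_download.py | match_vendor_columns_v2
-- ===== SOURCE A (Python) =====
-- def match_vendor_columns_v2(external_sheet, df_columns):
--     df_columns_match = len(df_columns) * [""]
--     for i_mvc in range(len(external_sheet)):
--         item_here = external_sheet[i_mvc]
--         key_mapping = item_here.get("keyMapping")
--         column_header = item_here.get("columnHeader")
--         for j_mvc in range(len(df_columns)):
--             column_here = df_columns[j_mvc]
--             if column_here == column_header:
--                 if key_mapping == None:
--                     key_mapping = "Customer_ID"
--                 key_mapping = str(key_mapping).replace(" ", "_")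
--                 df_columns_match[j_mvc] = key_mapping
--                 break
--
--     return df_columns_match
-- ===== SOURCE B (Python) =====
-- def match_vendor_columns_v2(external_sheet, df_columns):
--     # Build header -> processed keyMapping once (last item per header wins),
--     # then one pass over df_columns filling only the first occurrence of each header.
--     mapping = {}
--     for item in external_sheet:
--         header = item.get("columnHeader")
--         if header is not None:
--             key_mapping = item.get("keyMapping")
--             if key_mapping is None:
--                 key_mapping = "Customer_ID"
--             mapping[header] = str(key_mapping).replace(" ", "_")
--     result = []
--     seen = set()
--     for col in df_columns:
--         if col not in seen and col in mapping:
--             result.append(mapping[col])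
--             seen.add(col)
--         else:
--             result.append("")
--     return result
-- ===== Notes on version B (the rewrite author's own statement) =====
-- stated objective: faster
-- what changed: B replaces A's per-item rescans of df_columns by a header->key dict built in one pass over external_sheet (last item per header wins) followed by a single seen-set pass over df_columns that fills only the first occurrence of each header.
import Mathlib
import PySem

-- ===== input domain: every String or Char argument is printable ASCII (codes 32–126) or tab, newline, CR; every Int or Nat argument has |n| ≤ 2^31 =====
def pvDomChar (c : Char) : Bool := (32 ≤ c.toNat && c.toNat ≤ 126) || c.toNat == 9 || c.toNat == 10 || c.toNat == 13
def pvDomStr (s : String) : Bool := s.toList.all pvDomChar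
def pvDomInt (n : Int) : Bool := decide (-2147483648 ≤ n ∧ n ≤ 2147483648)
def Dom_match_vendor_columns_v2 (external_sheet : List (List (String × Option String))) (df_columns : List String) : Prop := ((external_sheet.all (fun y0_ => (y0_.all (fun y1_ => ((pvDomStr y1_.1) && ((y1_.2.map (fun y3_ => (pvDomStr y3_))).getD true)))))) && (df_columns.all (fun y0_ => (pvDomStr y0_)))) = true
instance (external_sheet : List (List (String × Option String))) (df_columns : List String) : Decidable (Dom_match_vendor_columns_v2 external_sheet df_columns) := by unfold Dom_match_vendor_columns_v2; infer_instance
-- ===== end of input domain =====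

-- B replaces A's nested scan (each sheet item rescans df_columns) by one header->key
-- dict built once plus a single seen-set pass over df_columns: objective 'faster' (asymptotic).

-- ===== PORT A =====
-- inner 'for j_mvc in range(len(df_columns)): … break' loop: scans the remaining
-- columns carrying the current index j, sets acc[j] at the first match and stops
def innerA (column_header : Option String) (key_mapping : Option String)
    (acc : List String) (j : Nat) : List String → List String
  | [] => acc
  | column_here :: rest =>
    if some column_here = column_header then
      acc.set j (PySem.Str.replace
        (match key_mapping with | none => "Customer_ID" | some s => s) " " "_")
    else innerA column_header key_mapping acc (j + 1) rest

def match_vendor_columns_v2 (external_sheet : List (List (String × Option String))) (df_columns : List String) : List String :=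
  external_sheet.foldl (fun acc item_here =>
    -- item_here.get(k) is None both when k is absent and when it maps to None: .bind id
    let key_mapping := (PySem.Dict.get? ⟨item_here⟩ "keyMapping").bind id
    let column_header := (PySem.Dict.get? ⟨item_here⟩ "columnHeader").bind id
    innerA column_header key_mapping acc 0 df_columns)
    (List.replicate df_columns.length "")

-- ===== PORT B =====
def buildMapB (external_sheet : List (List (String × Option String))) : PySem.Dict String String :=
  external_sheet.foldl (fun m item =>
    match (PySem.Dict.get? ⟨item⟩ "columnHeader").bind id with
    | none => m
    | some header =>
      let km := match (PySem.Dict.get? ⟨item⟩ "keyMapping").bind id with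
        | none => "Customer_ID"
        | some s => s
      m.insert header (PySem.Str.replace km " " "_")) PySem.Dict.empty

def fillB (mapping : PySem.Dict String String) : List String → PySem.Set String → List String
  | [], _ => []
  | col :: rest, seen =>
    if !(PySem.Set.contains seen col) && mapping.contains col then
      mapping.getD col "" :: fillB mapping rest (PySem.Set.add seen col)
    else
      "" :: fillB mapping rest seen

def match_vendor_columns_v2_alt (external_sheet : List (List (String × Option String))) (df_columns : List String) : List String :=
  fillB (buildMapB external_sheet) df_columns PySem.Set.empty

-- ===== PRECONDITION & SPEC =====
def Spec_match_vendor_columns_v2 (external_sheet : List (List (String × Option String))) (df_columns : List String) (out : List String) : Prop := out = match_vendor_columns_v2_alt external_sheet df_columns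
instance (external_sheet : List (List (String × Option String))) (df_columns : List String) (out : List String) : Decidable (Spec_match_vendor_columns_v2 external_sheet df_columns out) := by unfold Spec_match_vendor_columns_v2; infer_instance

-- ===== CLAIM (what is proved, stated in full; the proofs are below) =====
def Claim_equal_match_vendor_columns_v2 : Prop := ∀ (external_sheet : List (List (String × Option String))) (df_columns : List String), Dom_match_vendor_columns_v2 external_sheet df_columns → Spec_match_vendor_columns_v2 external_sheet df_columns (match_vendor_columns_v2 external_sheet df_columns)

-- ===== LEMMAS AND PROOFS =====

-- the processed keyMapping value an item contributes
def valOf (item : List (String × Option String)) : String :=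
  PySem.Str.replace
    (match (PySem.Dict.get? ⟨item⟩ "keyMapping").bind id with
     | none => "Customer_ID" | some s => s) " " "_"

-- the (header, value) event of an item, if it has a non-None columnHeader
def evt (item : List (String × Option String)) : Option (String × String) :=
  ((PySem.Dict.get? ⟨item⟩ "columnHeader").bind id).map (fun h => (h, valOf item))

-- one A-event applied to the accumulator
def stepA (dc : List String) (acc : List String) (e : String × String) : List String :=
  match dc.idxOf? e.1 with
  | some i => acc.set i e.2
  | none => acc

-- value of the LAST event whose header satisfies p
def lastVal (p : String → Bool) : List (String × String) → Option String
  | [] => none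
  | (h, v) :: rest => (lastVal p rest).elim (if p h then some v else none) some

theorem innerA_none (km : Option String) (acc : List String) (j : Nat) (l : List String) :
    innerA none km acc j l = acc := by
  induction l generalizing j with
  | nil => rfl
  | cons c rest ih => simp [innerA, ih]

theorem innerA_some (h : String) (km : Option String) (acc : List String) (j : Nat)
    (l : List String) :
    innerA (some h) km acc j l =
      match l.idxOf? h with
      | some i => acc.set (j + i)
          (PySem.Str.replace (match km with | none => "Customer_ID" | some s => s) " " "_")
      | none => acc := by
  induction l generalizing j with
  | nil => rfl
  | cons c rest ih =>
    simp only [innerA, Option.some.injEq]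
    by_cases hc : c = h
    · subst hc
      rw [if_pos rfl, List.idxOf?_cons, if_pos (by simp)]
      simp
    · rw [if_neg hc, ih, List.idxOf?_cons, if_neg (by simp [hc])]
      cases hidx : rest.idxOf? h with
      | none => simp
      | some i =>
        simp only [Option.map_some]
        congr 1
        omega

theorem A_eq_events_fold (es : List (List (String × Option String))) (dc : List String)
    (acc : List String) :
    es.foldl (fun acc item =>
        innerA ((PySem.Dict.get? ⟨item⟩ "columnHeader").bind id)
          ((PySem.Dict.get? ⟨item⟩ "keyMapping").bind id) acc 0 dc) acc
      = (es.filterMap evt).foldl (stepA dc) acc := by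
  induction es generalizing acc with
  | nil => rfl
  | cons item rest ih =>
    cases hch : (PySem.Dict.get? (⟨item⟩ : PySem.Dict String (Option String)) "columnHeader").bind id with
    | none =>
      have he : evt item = none := by unfold evt; rw [hch]; rfl
      simp only [List.foldl_cons, List.filterMap_cons, he, hch, innerA_none]
      exact ih _
    | some h =>
      have he : evt item = some (h, valOf item) := by unfold evt; rw [hch]; rfl
      simp only [List.foldl_cons, List.filterMap_cons, he, hch]
      rw [innerA_some, ih]
      congr 1
      simp only [stepA, valOf, Nat.zero_add]

theorem stepA_length (dc acc : List String) (e : String × String) :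
    (stepA dc acc e).length = acc.length := by
  unfold stepA; cases dc.idxOf? e.1 <;> simp

theorem foldA_length (E : List (String × String)) (dc acc : List String) :
    (E.foldl (stepA dc) acc).length = acc.length := by
  induction E generalizing acc with
  | nil => rfl
  | cons e rest ih => simp [List.foldl_cons, ih, stepA_length]

theorem foldA_getElem? (dc : List String) (E : List (String × String)) (acc : List String)
    (j : Nat) (hj : j < acc.length) :
    (E.foldl (stepA dc) acc)[j]? =
      (lastVal (fun h => dc.idxOf? h == some j) E).elim acc[j]? some := by
  induction E generalizing acc with
  | nil => rfl
  | cons e rest ih =>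
    obtain ⟨h, v⟩ := e
    simp only [List.foldl_cons]
    rw [ih (stepA dc acc (h, v)) (by rw [stepA_length]; exact hj)]
    simp only [lastVal]
    cases hlv : lastVal (fun h => dc.idxOf? h == some j) rest with
    | some w => simp
    | none =>
      by_cases hc : (dc.idxOf? h == some j) = true
      · rw [if_pos hc]
        have hidx : dc.idxOf? h = some j := by simpa using hc
        have hs : stepA dc acc (h, v) = acc.set j v := by simp [stepA, hidx]
        rw [hs, List.getElem?_set]
        simp [hj]
      · rw [if_neg hc]
        simp only [Option.elim]
        cases hidx : dc.idxOf? h with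
        | none => simp [stepA, hidx]
        | some i =>
          have hij : i ≠ j := by intro he; subst he; simp [hidx] at hc
          have hs : stepA dc acc (h, v) = acc.set i v := by simp [stepA, hidx]
          rw [hs, List.getElem?_set, if_neg hij]

theorem buildMapB_eq_events_fold (es : List (List (String × Option String)))
    (m : PySem.Dict String String) :
    es.foldl (fun m item =>
        match (PySem.Dict.get? ⟨item⟩ "columnHeader").bind id with
        | none => m
        | some header =>
          m.insert header (PySem.Str.replace
            (match (PySem.Dict.get? ⟨item⟩ "keyMapping").bind id with
             | none => "Customer_ID" | some s => s) " " "_")) m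
      = (es.filterMap evt).foldl (fun m e => m.insert e.1 e.2) m := by
  induction es generalizing m with
  | nil => rfl
  | cons item rest ih =>
    cases hch : (PySem.Dict.get? (⟨item⟩ : PySem.Dict String (Option String)) "columnHeader").bind id with
    | none =>
      have he : evt item = none := by unfold evt; rw [hch]; rfl
      simp only [List.foldl_cons, List.filterMap_cons, he, hch]
      exact ih _
    | some h =>
      have he : evt item = some (h, valOf item) := by unfold evt; rw [hch]; rfl
      simp only [List.foldl_cons, List.filterMap_cons, he, hch]
      rw [ih]
      simp only [valOf]

theorem get?_insert_fold (E : List (String × String)) (m : PySem.Dict String String)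
    (x : String) :
    (E.foldl (fun m e => m.insert e.1 e.2) m).get? x =
      (lastVal (fun h => h == x) E).elim (m.get? x) some := by
  induction E generalizing m with
  | nil => rfl
  | cons e rest ih =>
    obtain ⟨h, v⟩ := e
    simp only [List.foldl_cons]
    rw [ih]
    simp only [lastVal]
    cases hlv : lastVal (fun h => h == x) rest with
    | some w => simp
    | none =>
      simp only [Option.elim]
      rw [PySem.Dict.get?_insert]
      by_cases hx : h = x
      · subst hx; simp
      · simp [hx, Ne.symm hx]

theorem lastVal_congr (p q : String → Bool) (E : List (String × String))
    (hpq : ∀ h, p h = q h) : lastVal p E = lastVal q E := by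
  induction E with
  | nil => rfl
  | cons e rest ih => simp [lastVal, ih, hpq]

theorem lastVal_false (p : String → Bool) (E : List (String × String))
    (hp : ∀ h, p h = false) : lastVal p E = none := by
  induction E with
  | nil => rfl
  | cons e rest ih => simp [lastVal, ih, hp]

theorem fillB_length (m : PySem.Dict String String) (l : List String) (seen : PySem.Set String) :
    (fillB m l seen).length = l.length := by
  induction l generalizing seen with
  | nil => rfl
  | cons c rest ih =>
    unfold fillB
    split <;> simp [ih]

theorem fillB_getElem? (m : PySem.Dict String String) (l : List String)
    (seen : PySem.Set String) (j : Nat) (hj : j < l.length) :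
    (fillB m l seen)[j]? =
      some (if decide ((l[j]'hj) ∈ seen) || decide ((l[j]'hj) ∈ l.take j) || !(m.contains (l[j]'hj))
            then "" else m.getD (l[j]'hj) "") := by
  have hsc : ∀ (s : PySem.Set String) (x : String), PySem.Set.contains s x = decide (x ∈ s) := by
    intro s x
    rw [Bool.eq_iff_iff]
    simp
  induction l generalizing seen j with
  | nil => exact absurd hj (by simp)
  | cons c rest ih =>
    cases j with
    | zero =>
      unfold fillB
      by_cases hb : (!(PySem.Set.contains seen c) && m.contains c) = true
      · rw [if_pos hb]
        simp only [Bool.and_eq_true, Bool.not_eq_true', hsc, decide_eq_false_iff_not] at hb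
        simp [hb.1, hb.2]
      · rw [if_neg hb]
        simp only [Bool.and_eq_true, Bool.not_eq_true', not_and_or,
          Bool.not_eq_true, hsc, decide_eq_false_iff_not, not_not] at hb
        rcases hb with hb | hb <;> simp [hb]
    | succ j =>
      have hj' : j < rest.length := by simpa using hj
      unfold fillB
      by_cases hb : (!(PySem.Set.contains seen c) && m.contains c) = true
      · rw [if_pos hb]
        rw [List.getElem?_cons_succ, ih (PySem.Set.add seen c) j hj']
        simp only [Bool.and_eq_true, Bool.not_eq_true', hsc, decide_eq_false_iff_not] at hb
        simp only [List.getElem_cons_succ, List.take_succ_cons, Option.some.injEq]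
        by_cases hm : m.contains rest[j] = true
        · have hcond : decide (rest[j] ∈ PySem.Set.add seen c) = decide (rest[j] ∈ seen ∨ rest[j] = c) := by
            simp [PySem.Set.mem_add]
          rw [hcond]
          by_cases hc : rest[j] = c
          · simp [hc, hb.1]
          · simp [hc, List.mem_cons]
        · simp only [Bool.not_eq_true] at hm
          simp [hm]
      · rw [if_neg hb]
        rw [List.getElem?_cons_succ, ih seen j hj']
        simp only [Bool.and_eq_true, Bool.not_eq_true', not_and_or,
          Bool.not_eq_true, hsc, decide_eq_false_iff_not, not_not] at hb
        simp only [List.getElem_cons_succ, List.take_succ_cons, Option.some.injEq]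
        by_cases hm : m.contains rest[j] = true
        · by_cases hc : rest[j] = c
          · subst hc
            rcases hb with hb | hb
            · simp [hb]
            · rw [hm] at hb; exact absurd hb (by simp)
          · simp [hc]
        · simp only [Bool.not_eq_true] at hm
          simp [hm]

-- first-occurrence characterisation of idxOf? at a fixed position j
theorem idxOf?_eq_some_pred (dc : List String) (j : Nat) (hj : j < dc.length) (h : String) :
    (dc.idxOf? h == some j) =
      ((h == dc[j]'hj) && !(decide ((dc[j]'hj) ∈ dc.take j))) := by
  by_cases hmem : (dc[j]'hj) ∈ dc.take j
  · have hr : ((h == dc[j]'hj) && !(decide ((dc[j]'hj) ∈ dc.take j))) = false := by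
      simp [hmem]
    rw [hr, beq_eq_false_iff_ne]
    intro hcon
    rw [List.idxOf?_eq_some_iff] at hcon
    obtain ⟨_, hg, hmin⟩ := hcon
    obtain ⟨i, hi, hgi⟩ := List.mem_take_iff_getElem.mp hmem
    exact hmin i (by omega) (hgi.trans hg)
  · by_cases hh : h = dc[j]'hj
    · have hr : ((h == dc[j]'hj) && !(decide ((dc[j]'hj) ∈ dc.take j))) = true := by
        simp [hh, hmem]
      rw [hr, beq_iff_eq, List.idxOf?_eq_some_iff]
      exact ⟨hj, hh.symm, fun i hi hgi =>
        hmem (List.mem_take_iff_getElem.mpr ⟨i, by omega, hgi.trans hh⟩)⟩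
    · have hr : ((h == dc[j]'hj) && !(decide ((dc[j]'hj) ∈ dc.take j))) = false := by
        simp [hh]
      rw [hr, beq_eq_false_iff_ne]
      intro hcon
      rw [List.idxOf?_eq_some_iff] at hcon
      exact hh (hcon.2.1.symm)

theorem main_eq (es : List (List (String × Option String))) (dc : List String) :
    match_vendor_columns_v2 es dc = match_vendor_columns_v2_alt es dc := by
  apply List.ext_getElem?
  intro j
  by_cases hj : j < dc.length
  · have hA : (match_vendor_columns_v2 es dc)[j]? =
        some ((lastVal (fun h => dc.idxOf? h == some j) (es.filterMap evt)).getD "") := by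
      rw [match_vendor_columns_v2, A_eq_events_fold,
        foldA_getElem? dc _ _ j (by simpa using hj)]
      cases lastVal (fun h => dc.idxOf? h == some j) (es.filterMap evt) with
      | none => simp [hj]
      | some w => simp
    have hB : (match_vendor_columns_v2_alt es dc)[j]? =
        some (if decide ((dc[j]'hj) ∈ ([] : List String)) || decide ((dc[j]'hj) ∈ dc.take j)
                 || !((buildMapB es).contains (dc[j]'hj))
              then "" else (buildMapB es).getD (dc[j]'hj) "") := by
      rw [match_vendor_columns_v2_alt]
      exact fillB_getElem? _ _ _ j hj
    rw [hA, hB]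
    have hget : (buildMapB es).get? (dc[j]'hj) =
        (lastVal (fun h => h == dc[j]'hj) (es.filterMap evt)).elim none some := by
      rw [buildMapB, buildMapB_eq_events_fold, get?_insert_fold]
      rfl
    have hcontains : (buildMapB es).contains (dc[j]'hj) =
        ((buildMapB es).get? (dc[j]'hj)).isSome := PySem.Dict.contains_eq_isSome_get? _ _
    by_cases hmem : (dc[j]'hj) ∈ dc.take j
    · rw [lastVal_false _ _ (fun h => by
        simp [idxOf?_eq_some_pred dc j hj h, hmem])]
      simp [hmem]
    · rw [lastVal_congr _ (fun h => h == dc[j]'hj) _ (fun h => by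
        simp [idxOf?_eq_some_pred dc j hj h, hmem])]
      rw [PySem.Dict.getD_eq_get?_getD, hcontains, hget]
      cases lastVal (fun h => h == dc[j]'hj) (es.filterMap evt) with
      | none => simp [hmem]
      | some w => simp [hmem]
  · have h1 : (match_vendor_columns_v2 es dc).length = dc.length := by
      rw [match_vendor_columns_v2, A_eq_events_fold, foldA_length, List.length_replicate]
    have h2 : (match_vendor_columns_v2_alt es dc).length = dc.length := by
      rw [match_vendor_columns_v2_alt, fillB_length]
    rw [List.getElem?_eq_none (by omega), List.getElem?_eq_none (by omega)]

-- ===== VERDICT (by name: the statement is the Claim_ definition above) =====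
theorem match_vendor_columns_v2_spec : Claim_equal_match_vendor_columns_v2 := by
  intro es dc _
  unfold Spec_match_vendor_columns_v2
  exact main_eq es dc
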